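-- pv_equiv track=rewrite | github.com/rlawldn11703/problemSolving-sourceCode | Programmers/이모티콘_할인행사.py | cal_emoticonplus
-- ===== SOURCE A (Python) =====
-- def cal_emoticonplus(ratio:list,users:list,emoticons:list):
--     cnt,sales = 0,0 # 가입자수, 판매액
--     for want,budget in users:
--         buy = 0
--         for r,emoticon in zip(ratio,emoticons):
--             if r >= want : # 원하는 할인폭보다 크면
--                 buy += (100-r)*emoticon//100
--         if buy >= budget:
--             cnt += 1
--         else:
--             sales += buy
--     return cnt,sales
-- ===== SOURCE B (Python) =====
-- def cal_emoticonplus(ratio: list, users: list, emoticons: list):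
--     # Sort (ratio, emoticon) pairs by ratio, precompute suffix sums of
--     # discounted prices, then answer each user with one binary search.
--     pairs = sorted(zip(ratio, emoticons), key=lambda p: p[0])
--     keys = [r for r, _ in pairs]
--     suf = [0]
--     for r, e in reversed(pairs):
--         suf.append(suf[-1] + (100 - r) * e // 100)
--     suf.reverse()
--     cnt, sales = 0, 0
--     for want, budget in users:
--         lo, hi = 0, len(keys)
--         while lo < hi:
--             mid = (lo + hi) // 2
--             if keys[mid] < want:
--                 lo = mid + 1
--             else:
--                 hi = mid
--         buy = suf[lo]
--         if buy >= budget: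
--             cnt += 1
--         else:
--             sales += buy
--     return cnt, sales
-- ===== Notes on version B (the rewrite author's own statement) =====
-- stated objective: faster
-- what changed: Replaces the per-user rescan of all emoticons by sorting the (ratio, emoticon) pairs once, precomputing suffix sums of the discounted prices, and answering each user with one binary search.
import Mathlib
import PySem

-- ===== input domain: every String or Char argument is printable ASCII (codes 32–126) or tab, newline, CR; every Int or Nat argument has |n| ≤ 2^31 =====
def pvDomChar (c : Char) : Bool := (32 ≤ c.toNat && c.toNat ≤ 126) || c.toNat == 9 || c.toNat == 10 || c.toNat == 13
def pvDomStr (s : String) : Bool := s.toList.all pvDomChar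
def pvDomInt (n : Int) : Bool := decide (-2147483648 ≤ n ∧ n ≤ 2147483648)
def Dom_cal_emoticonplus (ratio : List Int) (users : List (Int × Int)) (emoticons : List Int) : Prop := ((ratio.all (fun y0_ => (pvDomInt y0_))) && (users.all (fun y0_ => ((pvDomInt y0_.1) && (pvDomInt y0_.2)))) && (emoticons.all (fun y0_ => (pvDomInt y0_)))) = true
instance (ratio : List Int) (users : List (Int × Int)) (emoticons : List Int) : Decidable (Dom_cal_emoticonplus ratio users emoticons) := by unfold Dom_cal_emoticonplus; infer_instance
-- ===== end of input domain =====

-- B sorts the (ratio, emoticon) pairs once, precomputes suffix sums of discounted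
-- prices and answers each user by binary search (objective: asymptotically faster).

-- ===== PORT A =====
def cal_emoticonplus (ratio : List Int) (users : List (Int × Int)) (emoticons : List Int) : Int × Int :=
  users.foldl (fun (st : Int × Int) wu =>
    let buy := (ratio.zip emoticons).foldl (fun b re =>
      if re.1 ≥ wu.1 then b + PySem.Int.floordiv ((100 - re.1) * re.2) 100 else b) 0
    if buy ≥ wu.2 then (st.1 + 1, st.2) else (st.1, st.2 + buy)) (0, 0)

-- ===== PORT B =====
-- suffix sums built back-to-front, as Source B's reversed-append loop does
def pvSuf : List (Int × Int) → List Int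
  | [] => [0]
  | (r, e) :: t => (PySem.Int.floordiv ((100 - r) * e) 100 + (pvSuf t).headI) :: pvSuf t

def cal_emoticonplus_alt (ratio : List Int) (users : List (Int × Int)) (emoticons : List Int) : Int × Int :=
  let pairs := PySem.List.sorted (ratio.zip emoticons) (fun p => p.1) false
  let keys := pairs.map (fun p => p.1)
  let suf := pvSuf pairs
  users.foldl (fun (st : Int × Int) wu =>
    let buy := suf.getD (PySem.List.bisectLeft keys wu.1) 0
    if buy ≥ wu.2 then (st.1 + 1, st.2) else (st.1, st.2 + buy)) (0, 0)

-- ===== PRECONDITION & SPEC =====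
def Spec_cal_emoticonplus (ratio : List Int) (users : List (Int × Int)) (emoticons : List Int) (out : Int × Int) : Prop := out = cal_emoticonplus_alt ratio users emoticons
instance (ratio : List Int) (users : List (Int × Int)) (emoticons : List Int) (out : Int × Int) : Decidable (Spec_cal_emoticonplus ratio users emoticons out) := by unfold Spec_cal_emoticonplus; infer_instance

-- ===== CLAIM (what is proved, stated in full; the proofs are below) =====
def Claim_equal_cal_emoticonplus : Prop := ∀ (ratio : List Int) (users : List (Int × Int)) (emoticons : List Int), Dom_cal_emoticonplus ratio users emoticons → Spec_cal_emoticonplus ratio users emoticons (cal_emoticonplus ratio users emoticons)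

-- ===== LEMMAS AND PROOFS =====

def pvPrice (re : Int × Int) : Int := PySem.Int.floordiv ((100 - re.1) * re.2) 100

-- A's inner loop is the sum of prices over the pairs with r ≥ want
theorem pvA_buy (l : List (Int × Int)) (want : Int) (b : Int) :
    l.foldl (fun b re => if re.1 ≥ want then b + PySem.Int.floordiv ((100 - re.1) * re.2) 100 else b) b
      = b + ((l.filter (fun re => want ≤ re.1)).map pvPrice).sum := by
  induction l generalizing b with
  | nil => simp
  | cons h t ih =>
    simp only [List.foldl_cons, List.filter_cons, ge_iff_le]
    by_cases hp : want ≤ h.1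
    · simp only [hp, if_true, decide_true, List.map_cons, List.sum_cons, ih, pvPrice]
      ring
    · simp only [hp, if_false, decide_false, Bool.false_eq_true, ih]

-- pvSuf computes suffix sums of prices
theorem pvSuf_getD (l : List (Int × Int)) (i : Nat) :
    (pvSuf l).getD i 0 = ((l.drop i).map pvPrice).sum := by
  induction l generalizing i with
  | nil => cases i <;> simp [pvSuf]
  | cons h t ih =>
    obtain ⟨r, e⟩ := h
    cases i with
    | zero =>
      have hh : (pvSuf t).headI = (t.map pvPrice).sum := by
        have h0 := ih 0
        cases ht : pvSuf t with
        | nil => exact absurd ht (by cases t <;> simp [pvSuf])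
        | cons a s =>
          rw [ht] at h0
          simpa using h0

      simp only [pvSuf, List.getD_cons_zero, hh, List.drop_zero, List.map_cons,
        List.sum_cons, pvPrice]
    | succ j =>
      simp only [pvSuf, List.getD_cons_succ, List.drop_succ_cons]
      exact ih j

-- the suffix starting at the bisect index is exactly the filtered set
theorem pvDrop_eq_filter (s : List (Int × Int)) (want : Int)
    (hs : s.Pairwise (fun a b => a.1 ≤ b.1)) :
    s.drop (PySem.List.bisectLeft (s.map (fun p => p.1)) want)
      = s.filter (fun re => want ≤ re.1) := by
  have hk : (s.map (fun p => p.1)).Pairwise (fun a b => a ≤ b) :=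
    List.Pairwise.map _ (fun _ _ h => h) hs
  obtain ⟨hle, hlt, hge⟩ := PySem.List.bisectLeft_spec (s.map (fun p => p.1)) want hk
  set k := PySem.List.bisectLeft (s.map (fun p => p.1)) want with hkdef
  rw [List.length_map] at hle
  have htake : ∀ x ∈ s.take k, ¬ (want ≤ x.1) := by
    intro x hx
    obtain ⟨j, hj, hxj⟩ := List.mem_iff_getElem.mp hx
    have hjk : j < k := lt_of_lt_of_le hj (by simp)
    have hjs : j < s.length := lt_of_lt_of_le hjk hle
    have := hlt j (by simpa using hjs) (by simpa using hjk)
    rw [List.getElem_take] at hxj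
    simp only [List.getElem_map] at this
    rw [hxj] at this
    omega
  have hdrop : ∀ x ∈ s.drop k, want ≤ x.1 := by
    intro x hx
    obtain ⟨j, hj, hxj⟩ := List.mem_iff_getElem.mp hx
    rw [List.getElem_drop] at hxj
    have hjs : k + j < s.length := by
      have := List.length_drop (l := s) (i := k); omega
    have := hge (k + j) (by simpa using hjs) (Nat.le_add_right _ _)
    simp only [List.getElem_map] at this
    rw [hxj] at this
    exact this
  conv_rhs => rw [← List.take_append_drop k s]
  rw [List.filter_append]
  rw [List.filter_eq_nil_iff.mpr (by intro a ha; simpa using htake a ha)]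
  rw [List.filter_eq_self.mpr (by intro a ha; simpa using hdrop a ha)]
  simp

-- per-user agreement of the two "buy" computations
theorem pvBuy_eq (ratio emoticons : List Int) (want : Int) :
    (pvSuf (PySem.List.sorted (ratio.zip emoticons) (fun p => p.1) false)).getD
        (PySem.List.bisectLeft ((PySem.List.sorted (ratio.zip emoticons) (fun p => p.1) false).map (fun p => p.1)) want) 0
      = (ratio.zip emoticons).foldl (fun b re =>
          if re.1 ≥ want then b + PySem.Int.floordiv ((100 - re.1) * re.2) 100 else b) 0 := by
  set s := PySem.List.sorted (ratio.zip emoticons) (fun p => p.1) false with hsdef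
  have hs : s.Pairwise (fun a b => a.1 ≤ b.1) := PySem.List.sorted_pairwise _ _
  rw [pvSuf_getD, pvDrop_eq_filter s want hs, pvA_buy]
  have hperm : s.Perm (ratio.zip emoticons) := PySem.List.sorted_perm _ _ _
  have := ((hperm.filter (fun re => decide (want ≤ re.1))).map pvPrice).sum_eq
  simpa using this

-- ===== VERDICT (by name: the statement is the Claim_ definition above) =====
theorem cal_emoticonplus_spec : Claim_equal_cal_emoticonplus := by
  intro ratio users emoticons _
  unfold Spec_cal_emoticonplus cal_emoticonplus cal_emoticonplus_alt
  dsimp only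
  congr 1
  funext st wu
  rw [pvBuy_eq]
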